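-- pv_equiv track=rewrite | github.com/ArneBinder/pie-modules | src/pie_modules/utils/sequence_tagging/ill_formed.py | remove_iob2
-- ===== SOURCE A (Python) =====
-- from typing import List
--
-- def remove_iob2(
--     tag_sequence: List[str],
-- ) -> List[str]:
--     """Removes the ill formed tag sequence from the given sequence.
--
--     e.g: BaIaLa converts to BaIaO      BaIaBaBaIbBb converts to BaIaBaBaOBb
--     """
--     index = 0
--     while index < len(tag_sequence):
--         label = tag_sequence[index]
--         if label[0] == "B":
--             current_span_label = label.partition("-")[2]
--             expected_label = f"I-{current_span_label}"
--             index += 1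
--             if index < len(tag_sequence):
--                 label = tag_sequence[index]
--             if label[0] == "B":
--                 continue
--             while label == expected_label and index < len(tag_sequence):
--                 index += 1
--                 if index < len(tag_sequence):
--                     label = tag_sequence[index]
--         else:
--             if label == "O":
--                 index += 1
--                 continue
--             tag_sequence[index] = "O"
--     return tag_sequence
-- ===== SOURCE B (Python) =====
-- from typing import List
--
-- def remove_iob2(
--     tag_sequence: List[str],
-- ) -> List[str]:
--     """Single flat pass: keep one state variable `expected` (the valid
--     continuation tag of the current span) and fix each position in place."""
--     expected = None
--     for i, label in enumerate(tag_sequence):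
--         if label.startswith("B"):
--             expected = "I-" + label.partition("-")[2]
--         elif label == expected:
--             pass
--         elif label == "O":
--             expected = None
--         else:
--             tag_sequence[i] = "O"
--             expected = None
--     return tag_sequence
-- ===== Notes on version B (the rewrite author's own statement) =====
-- stated objective: simpler
-- what changed: Replaces A's index-rewinding nested while-loops (with re-processing of the same index after a replacement) by a single flat enumerate pass maintaining one state variable `expected`, the currently valid continuation tag.
import Mathlib
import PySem

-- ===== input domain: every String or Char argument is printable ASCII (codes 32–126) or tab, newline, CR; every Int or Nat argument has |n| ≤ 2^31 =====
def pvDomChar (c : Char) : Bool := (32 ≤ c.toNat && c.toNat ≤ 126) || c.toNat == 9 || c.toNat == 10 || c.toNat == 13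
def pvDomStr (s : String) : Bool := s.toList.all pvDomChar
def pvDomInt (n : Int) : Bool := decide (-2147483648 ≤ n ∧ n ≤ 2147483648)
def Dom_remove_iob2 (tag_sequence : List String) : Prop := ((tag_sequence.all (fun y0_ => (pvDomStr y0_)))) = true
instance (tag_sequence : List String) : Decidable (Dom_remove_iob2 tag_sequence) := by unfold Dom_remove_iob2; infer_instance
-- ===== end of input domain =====

-- B replaces A's index-rewinding nested while-loops by a single flat pass with one
-- `expected` state variable (objective: simpler). Both A and B mutate the list in
-- place in Python and return it; the equivalence proved here is about the returned value
-- (B performs the same in-place mutation in Python).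


-- ===== PORT A =====
-- label.partition("-")[2] : the part after the first '-', "" if there is none (exact for partition's third component, hand-ported)
def pvAfterDash : List Char → List Char
  | [] => []
  | c :: t => if c = '-' then t else pvAfterDash t

def pvPart2 (s : String) : String := String.ofList (pvAfterDash s.toList)

-- label[0] == "B" (on "" Python raises IndexError; excluded by Pre_ below, the port falls through)
def pvIsB (label : String) : Bool := PySem.Str.pyGet? label 0 == some 'B'

-- the inner `while label == expected_label and index < len(tag_sequence)` of A (returns the final index)
def pvConsume (seq : List String) (e : String) (index : Nat) (label : String) : Nat :=
  if h : label = e ∧ index < seq.length then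
    pvConsume seq e (index + 1) (if index + 1 < seq.length then seq.getD (index + 1) "" else label)
  else index
termination_by seq.length - index
decreasing_by omega

-- termination helper for the outer loop (the port cites it in decreasing_by)
theorem pvConsume_ge (seq : List String) (e : String) (index : Nat) (label : String) :
    index ≤ pvConsume seq e index label := by
  fun_induction pvConsume <;> (try simp only [dite_eq_ite] at *) <;> omega

-- the outer `while index < len(tag_sequence)` of A; the replace branch re-runs the same index on the updated list
def pvLoopA (seq : List String) (index : Nat) : List String :=
  if h : index < seq.length then
    let label := seq.getD index ""
    if hB : pvIsB label then
      let expected := "I-" ++ pvPart2 label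
      let index1 := index + 1
      let label1 := if index1 < seq.length then seq.getD index1 "" else label
      if pvIsB label1 then
        pvLoopA seq index1
      else
        pvLoopA seq (pvConsume seq expected index1 label1)
    else if label = "O" then
      pvLoopA seq (index + 1)
    else
      pvLoopA (seq.set index "O") index
  else seq
termination_by 2 * (seq.length - index) + (if seq.getD index "" = "O" then 0 else 1)
decreasing_by
  · split <;> split <;> omega
  · have hge := pvConsume_ge seq ("I-" ++ pvPart2 (seq.getD index "")) (index + 1)
      (if h : index + 1 < seq.length then seq.getD (index + 1) "" else seq.getD index "")
    generalize hj : pvConsume seq ("I-" ++ pvPart2 (seq.getD index "")) (index + 1)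
      (if h : index + 1 < seq.length then seq.getD (index + 1) "" else seq.getD index "") = j at hge ⊢
    split <;> split <;> omega
  · rename_i hO
    have hO' : seq.getD index "" = "O" := hO
    rw [if_pos hO']
    split <;> omega
  · rename_i hO
    have hO' : ¬ seq.getD index "" = "O" := hO
    have hset : (seq.set index "O").getD index "" = "O" := by
      simp [List.getD_eq_getElem?_getD, ‹index < seq.length›]
    rw [List.length_set, hset, if_pos rfl, if_neg hO']
    omega

def remove_iob2 (tag_sequence : List String) : List String := pvLoopA tag_sequence 0

-- ===== PORT B =====
-- B's single flat pass: `expected` is the currently valid continuation tag of the open span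
def pvGoB : Option String → List String → List String
  | _, [] => []
  | expected, label :: rest =>
    if PySem.Str.startswith label "B" then
      label :: pvGoB (some ("I-" ++ pvPart2 label)) rest
    else if some label = expected then
      label :: pvGoB expected rest
    else if label = "O" then
      label :: pvGoB none rest
    else
      "O" :: pvGoB none rest

def remove_iob2_alt (tag_sequence : List String) : List String := pvGoB none tag_sequence

-- ===== PRECONDITION & SPEC =====
-- Pre_ excludes lists containing an empty tag string: there Python A raises IndexError on label[0].
def Pre_remove_iob2 (tag_sequence : List String) : Prop := "" ∉ tag_sequence
instance (tag_sequence : List String) : Decidable (Pre_remove_iob2 tag_sequence) := by unfold Pre_remove_iob2; infer_instance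

def pvWitness_remove_iob2 : List String := ["B-a", "I-a", "I-b", "O", "B-b"]

def Spec_remove_iob2 (tag_sequence : List String) (out : List String) : Prop := out = remove_iob2_alt tag_sequence
instance (tag_sequence : List String) (out : List String) : Decidable (Spec_remove_iob2 tag_sequence out) := by unfold Spec_remove_iob2; infer_instance

-- ===== CLAIM (what is proved, stated in full; the proofs are below) =====
def Claim_equal_remove_iob2 : Prop := ∀ (tag_sequence : List String), Dom_remove_iob2 tag_sequence → Pre_remove_iob2 tag_sequence → Spec_remove_iob2 tag_sequence (remove_iob2 tag_sequence)

-- ===== LEMMAS AND PROOFS =====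
theorem pvIsB_eq_startswith (l : String) : pvIsB l = PySem.Str.startswith l "B" := by
  simp only [pvIsB, PySem.Str.pyGet?, PySem.Str.startswith, PySem.Chars.startswith,
    PySem.List.pyGet?, PySem.List.pyIdx?, ← String.length_toList]
  rcases l.toList with _ | ⟨c, t⟩
  · decide
  · simp [List.isPrefixOf, eq_comm]

theorem pvIsB_app_I (s : String) : pvIsB ("I-" ++ s) = false := by
  simp only [pvIsB, PySem.Str.pyGet?, PySem.List.pyGet?, PySem.List.pyIdx?, ← String.length_toList]
  simp

theorem pvStartswith_app_I (s : String) : PySem.Str.startswith ("I-" ++ s) "B" = false := by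
  simp [PySem.Str.startswith, PySem.Chars.startswith, List.isPrefixOf]

theorem pvGetD_app (pre : List String) (c : String) (rest : List String) :
    (pre ++ c :: rest).getD pre.length "" = c := by
  simp [List.getD_eq_getElem?_getD]

theorem pvSet_app (pre : List String) (c x : String) (rest : List String) :
    (pre ++ c :: rest).set pre.length x = pre ++ x :: rest := by
  rw [List.set_append]
  simp

theorem pvConsume_spec : ∀ (cur pre : List String) (e c : String),
    pvConsume (pre ++ c :: cur) e pre.length c
      = pre.length + ((c :: cur).takeWhile (· == e)).length := by
  intro cur
  induction cur with
  | nil =>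
    intro pre e c
    by_cases hce : c = e
    · subst hce
      rw [pvConsume, dif_pos ⟨rfl, by simp⟩]
      rw [pvConsume, dif_neg (by simp)]
      rw [List.takeWhile_cons_of_pos (by simp)]
      simp
    · rw [pvConsume, dif_neg (by simp [hce])]
      rw [List.takeWhile_cons_of_neg (by simp [hce])]
      simp
  | cons c' cur' ih =>
    intro pre e c
    by_cases hce : c = e
    · subst hce
      rw [pvConsume, dif_pos ⟨rfl, by simp⟩]
      have hlt : pre.length + 1 < (pre ++ c :: c' :: cur').length := by simp
      rw [if_pos hlt]
      have harr : pre ++ c :: c' :: cur' = (pre ++ [c]) ++ c' :: cur' := by simp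
      have hlen : pre.length + 1 = (pre ++ [c]).length := by simp
      have hget : (pre ++ c :: c' :: cur').getD (pre.length + 1) "" = c' := by
        rw [harr, hlen, pvGetD_app]
      rw [hget, harr, hlen, ih (pre ++ [c]) c c']
      conv_rhs => rw [List.takeWhile_cons_of_pos (by simp)]
      simp only [List.length_append, List.length_cons, List.length_nil]
      omega
    · rw [pvConsume, dif_neg (by simp [hce])]
      rw [List.takeWhile_cons_of_neg (by simp [hce])]
      simp

theorem pvGoB_mismatch (e c : String) (cur : List String) (h : c ≠ e) :
    pvGoB (some e) (c :: cur) = pvGoB none (c :: cur) := by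
  simp only [pvGoB]
  split_ifs with h1 h2 h3 h3 <;> simp_all

theorem pvGoB_run (e : String) (hB : PySem.Str.startswith e "B" = false) :
    ∀ cur : List String,
      pvGoB (some e) cur = cur.takeWhile (· == e) ++ pvGoB none (cur.dropWhile (· == e)) := by
  intro cur
  induction cur with
  | nil => simp [pvGoB]
  | cons c cur' ih =>
    by_cases hce : c = e
    · subst hce
      rw [List.takeWhile_cons_of_pos (by simp), List.dropWhile_cons_of_pos (by simp)]
      simp only [pvGoB, hB, Bool.false_eq_true, if_false, if_pos rfl]
      simp [ih]
    · rw [List.takeWhile_cons_of_neg (by simp [hce]), List.dropWhile_cons_of_neg (by simp [hce])]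
      simpa using pvGoB_mismatch e c cur' hce

theorem pvMain : ∀ (n : Nat) (cur : List String), cur.length ≤ n → ∀ pre : List String,
    pvLoopA (pre ++ cur) pre.length = pre ++ pvGoB none cur := by
  intro n
  induction n with
  | zero =>
    intro cur hlen pre
    have hnil : cur = [] := List.eq_nil_of_length_eq_zero (Nat.le_zero.mp hlen)
    subst hnil
    rw [pvLoopA]
    simp [pvGoB]
  | succ n ih =>
    intro cur hlen pre
    match cur with
    | [] =>
      rw [pvLoopA]
      simp [pvGoB]
    | l :: rest =>
      have hidx : pre.length < (pre ++ l :: rest).length := by simp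
      rw [pvLoopA, dif_pos hidx]
      simp only [pvGetD_app]
      by_cases hB : pvIsB l
      · rw [dif_pos hB]
        match rest with
        | [] =>
          have hnlt : ¬ (pre.length + 1 < (pre ++ [l]).length) := by simp
          rw [if_neg hnlt, if_pos hB]
          rw [pvLoopA, dif_neg (by simp)]
          simp only [pvGoB, pvIsB_eq_startswith l ▸ hB]
          simp [← pvIsB_eq_startswith, hB]
        | r :: rest' =>
          have hlt1 : pre.length + 1 < (pre ++ l :: r :: rest').length := by simp
          rw [if_pos hlt1]
          have hget1 : (pre ++ l :: r :: rest').getD (pre.length + 1) "" = r := by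
            have : pre ++ l :: r :: rest' = (pre ++ [l]) ++ r :: rest' := by simp
            rw [this, show pre.length + 1 = (pre ++ [l]).length by simp, pvGetD_app]
          rw [hget1]
          have hslB : PySem.Str.startswith l "B" = true := pvIsB_eq_startswith l ▸ hB
          have hch : PySem.Chars.startswith l.toList ['B'] = true := by simpa using hslB
          by_cases hrB : pvIsB r
          · rw [if_pos hrB]
            have hih := ih (r :: rest') (by simpa using Nat.le_of_succ_le_succ hlen) (pre ++ [l])
            rw [show (pre ++ [l]) ++ r :: rest' = pre ++ l :: r :: rest' by simp,
              show (pre ++ [l]).length = pre.length + 1 by simp] at hih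
            rw [hih]
            have hre : r ≠ "I-" ++ pvPart2 l := by
              intro hcontr
              rw [hcontr] at hrB
              rw [pvIsB_app_I] at hrB
              exact absurd hrB (by simp)
            conv_rhs => rw [show pvGoB none (l :: r :: rest')
                = l :: pvGoB (some ("I-" ++ pvPart2 l)) (r :: rest') from by
              conv_lhs => rw [pvGoB]
              rw [if_pos (by simpa using hslB)]]
            rw [pvGoB_mismatch _ _ _ hre]
            simp
          · rw [if_neg hrB]
            have hcons := pvConsume_spec rest' (pre ++ [l]) ("I-" ++ pvPart2 l) r
            rw [show (pre ++ [l]) ++ r :: rest' = pre ++ l :: r :: rest' by simp,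
              show (pre ++ [l]).length = pre.length + 1 by simp] at hcons
            rw [hcons]
            have hsplit := List.takeWhile_append_dropWhile
              (p := fun x => x == ("I-" ++ pvPart2 l)) (l := r :: rest')
            have hlist : pre ++ l :: r :: rest'
                = (pre ++ l :: (r :: rest').takeWhile (fun x => x == ("I-" ++ pvPart2 l)))
                  ++ (r :: rest').dropWhile (fun x => x == ("I-" ++ pvPart2 l)) := by
              conv_lhs => rw [← hsplit]
              simp
            have hlen2 : pre.length + 1
                  + ((r :: rest').takeWhile (fun x => x == ("I-" ++ pvPart2 l))).length
                = (pre ++ l :: (r :: rest').takeWhile (fun x => x == ("I-" ++ pvPart2 l))).length := by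
              simp
              omega
            rw [hlen2]
            conv_lhs => rw [hlist]
            have hdwlen : ((r :: rest').dropWhile (fun x => x == ("I-" ++ pvPart2 l))).length ≤ n := by
              have h1 := List.length_dropWhile_le (p := fun x => x == ("I-" ++ pvPart2 l)) (l := r :: rest')
              simp at h1 hlen ⊢
              omega
            rw [ih _ hdwlen]
            conv_rhs => rw [show pvGoB none (l :: r :: rest')
                = l :: pvGoB (some ("I-" ++ pvPart2 l)) (r :: rest') from by
              conv_lhs => rw [pvGoB]
              rw [if_pos (by simpa using hslB)]]
            rw [pvGoB_run _ (pvStartswith_app_I (pvPart2 l)) (r :: rest')]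
            simp
      · rw [dif_neg hB]
        have hslB : PySem.Str.startswith l "B" = false := by
          rw [← pvIsB_eq_startswith]; simpa using hB
        have hch0 : PySem.Chars.startswith l.toList ['B'] = false := by simpa using hslB
        by_cases hO : l = "O"
        · rw [if_pos hO]
          have hih := ih rest (by simpa using Nat.le_of_succ_le_succ hlen) (pre ++ [l])
          rw [show (pre ++ [l]) ++ rest = pre ++ l :: rest by simp,
            show (pre ++ [l]).length = pre.length + 1 by simp] at hih
          rw [hih]
          simp [pvGoB, hO, show PySem.Chars.startswith ['O'] ['B'] = false from by decide]
        · rw [if_neg hO]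
          rw [pvSet_app]
          rw [pvLoopA, dif_pos (by simp), pvGetD_app]
          rw [dif_neg (by rw [pvIsB_eq_startswith]; decide), if_pos rfl]
          have hih := ih rest (by simpa using Nat.le_of_succ_le_succ hlen) (pre ++ ["O"])
          rw [show (pre ++ ["O"]) ++ rest = pre ++ "O" :: rest by simp,
            show (pre ++ ["O"]).length = pre.length + 1 by simp] at hih
          rw [hih]
          simp [pvGoB, hch0, hO]

-- ===== VERDICT (by name: the statement is the Claim_ definition above) =====
theorem remove_iob2_spec : Claim_equal_remove_iob2 := by
  intro ts _ _
  unfold Spec_remove_iob2 remove_iob2 remove_iob2_alt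
  have h := pvMain ts.length ts le_rfl []
  simpa using h
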